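-- pv_equiv track=rewrite | github.com/dblessed/Setting-up-a-microphone | rmsenergy.py | rmsEnergy
-- ===== SOURCE A (Python) =====
-- def rmsEnergy(wave_data) :
--     energy = []
--     sum = 0
--     for i in range(len(wave_data)) :
--         sum = sum + (int(wave_data[i]) * int(wave_data[i]))
--         if (i + 1) % 256 == 0 :
--             energy.append(sum)
--             sum = 0
--         elif i == len(wave_data) - 1 :
--             energy.append(sum)
--     return energy
-- ===== SOURCE B (Python) =====
-- def rmsEnergy(wave_data):
--     return [sum(int(x) * int(x) for x in wave_data[start:start + 256])
--             for start in range(0, len(wave_data), 256)]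
-- ===== Notes on version B (the rewrite author's own statement) =====
-- stated objective: simpler
-- what changed: Replaces A's flat indexed pass with a running accumulator, a (i+1)%256 modulo boundary test and a last-element special case by chunking the input into 256-sample slices and summing the squares of each chunk.
import Mathlib
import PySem

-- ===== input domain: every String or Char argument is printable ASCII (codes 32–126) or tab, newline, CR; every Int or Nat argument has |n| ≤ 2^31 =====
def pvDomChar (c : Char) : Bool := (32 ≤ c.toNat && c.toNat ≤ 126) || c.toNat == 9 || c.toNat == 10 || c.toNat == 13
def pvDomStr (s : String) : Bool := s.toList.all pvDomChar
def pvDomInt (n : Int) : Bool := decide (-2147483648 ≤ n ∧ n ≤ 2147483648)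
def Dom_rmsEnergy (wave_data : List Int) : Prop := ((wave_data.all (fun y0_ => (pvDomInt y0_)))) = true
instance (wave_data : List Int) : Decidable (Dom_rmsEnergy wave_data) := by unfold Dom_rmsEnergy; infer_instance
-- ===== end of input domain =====

-- B replaces A's flat indexed pass (running accumulator, `(i+1)%256` boundary test, last-element
-- special case) by slicing the input into 256-sample chunks and summing the squares of each chunk
-- (objective: simpler decomposition; same O(n) cost).

-- ===== PORT A =====
def rmsEnergy (wave_data : List Int) : List Int :=
  let n : Int := wave_data.length
  let st := (PySem.List.pyRange 0 n 1).foldl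
    (fun (st : List Int × Int) (i : Int) =>
      let x := PySem.List.pyGetD wave_data i 0
      let s := st.2 + x * x
      if PySem.Int.mod (i + 1) 256 = 0 then (st.1 ++ [s], 0)
      else if i = n - 1 then (st.1 ++ [s], s)
      else (st.1, s))
    ([], 0)
  st.1

-- ===== PORT B =====
def rmsEnergy_alt (wave_data : List Int) : List Int :=
  (PySem.List.pyRange 0 (wave_data.length : Int) 256).map
    (fun start => ((PySem.List.slice wave_data (some start) (some (start + 256))).map
      (fun x => x * x)).sum)

-- ===== PRECONDITION & SPEC =====
def Spec_rmsEnergy (wave_data : List Int) (out : List Int) : Prop := out = rmsEnergy_alt wave_data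
instance (wave_data : List Int) (out : List Int) : Decidable (Spec_rmsEnergy wave_data out) := by unfold Spec_rmsEnergy; infer_instance

-- ===== CLAIM (what is proved, stated in full; the proofs are below) =====
def Claim_equal_rmsEnergy : Prop := ∀ (wave_data : List Int), Dom_rmsEnergy wave_data → Spec_rmsEnergy wave_data (rmsEnergy wave_data)

-- ===== LEMMAS AND PROOFS =====

-- sum of squares of a chunk (B's per-chunk computation)
def sumsq (l : List Int) : Int := (l.map (fun x => x * x)).sum

-- reference value: sum of squares of each 256-block, in order
def chunksSpec (l : List Int) : List Int :=
  if l = [] then [] else sumsq (l.take 256) :: chunksSpec (l.drop 256)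
termination_by l.length
decreasing_by cases l with
  | nil => simp_all
  | cons x xs => simp

lemma chunksSpec_nil : chunksSpec [] = [] := by unfold chunksSpec; rfl

lemma chunksSpec_cons (x : Int) (xs : List Int) :
    chunksSpec (x :: xs) = sumsq ((x :: xs).take 256) :: chunksSpec ((x :: xs).drop 256) := by
  conv_lhs => unfold chunksSpec
  simp

-- A's loop body with the index read back as a Nat

def bodyN (l : List Int) (m : Nat) : List Int × Int → Nat → List Int × Int := fun st k =>
  let x := l.getD k 0
  let s := st.2 + x * x
  if (k + 1) % 256 = 0 then (st.1 ++ [s], 0)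
  else if k + 1 = m then (st.1 ++ [s], s)
  else (st.1, s)

-- A's loop as element-wise recursion: s = pending sum, r = samples left in the current block
def auxC : List Int → Int → Nat → List Int
  | [], _, _ => []
  | x :: xs, s, r =>
    if r = 1 then (s + x * x) :: auxC xs 0 256
    else if xs = [] then [s + x * x]
    else auxC xs (s + x * x) (r - 1)

lemma pr256_nil (a b : Int) (h : b ≤ a) : PySem.List.pyRange a b 256 = [] := by
  rw [PySem.List.pyRange_of_pos a b (by norm_num)]
  simp [not_lt.mpr h]

lemma pr256_cons (a b : Int) (h : a < b) :
    PySem.List.pyRange a b 256 = a :: PySem.List.pyRange (a + 256) b 256 := by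
  rw [PySem.List.pyRange_of_pos a b (by norm_num),
      PySem.List.pyRange_of_pos (a + 256) b (by norm_num)]
  have hc : (if a < b then ((b - a + 256 - 1) / 256).toNat else 0)
      = (if a + 256 < b then ((b - (a + 256) + 256 - 1) / 256).toNat else 0) + 1 := by
    split_ifs <;> omega
  rw [hc, List.range_succ_eq_map, List.map_cons, List.map_map]
  have hf : ((fun k : Nat => a + 256 * (k : Int)) ∘ Nat.succ)
      = fun k : Nat => (a + 256) + 256 * (k : Int) := by
    funext k; simp [Function.comp]; ring
  simp [hf]

-- characterisation of auxC as block sums (for a fresh-enough budget)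
lemma auxC_chunks : ∀ (l : List Int), l ≠ [] → ∀ (s : Int) (r : Nat), 1 ≤ r →
    auxC l s r = (s + sumsq (l.take r)) :: chunksSpec (l.drop r) := by
  intro l
  induction l with
  | nil => intro h; exact absurd rfl h
  | cons x xs ih =>
    intro _ s r hr
    by_cases hr1 : r = 1
    · subst hr1
      have htail : auxC xs 0 256 = chunksSpec xs := by
        cases hxs : xs with
        | nil => simp [auxC, chunksSpec_nil]
        | cons y ys =>
          rw [← hxs, ih (by simp [hxs]) 0 256 (by omega)]
          rw [hxs, chunksSpec_cons]
          simp
      simp [auxC, htail, sumsq]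
    · have hr2 : 2 ≤ r := by omega
      cases hxs : xs with
      | nil =>
        subst hxs
        have h1 : List.take r [x] = [x] := List.take_of_length_le (by simp; omega)
        have h2 : List.drop r [x] = ([] : List Int) := List.drop_eq_nil_of_le (by simp; omega)
        simp [auxC, hr1, sumsq, h1, h2, chunksSpec_nil]
      | cons y ys =>
        rw [← hxs]
        have : auxC (x :: xs) s r = auxC xs (s + x * x) (r - 1) := by
          simp [auxC, hr1, hxs]
        rw [this, ih (by simp [hxs]) (s + x * x) (r - 1) (by omega)]
        have htake : (x :: xs).take r = x :: xs.take (r - 1) := by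
          have : r = (r - 1) + 1 := by omega
          rw [this]; simp
        have hdrop : (x :: xs).drop r = xs.drop (r - 1) := by
          have : r = (r - 1) + 1 := by omega
          rw [this]; simp
        rw [htake, hdrop]
        simp [sumsq]; ring

-- A's indexed fold, started anywhere, computes auxC on the remaining suffix
lemma loopA_eq (l : List Int) : ∀ (c j : Nat) (acc : List Int) (s : Int), j + c = l.length →
    ((List.range' j c).foldl (bodyN l l.length) (acc, s)).1
      = acc ++ auxC (l.drop j) s (256 - j % 256) := by
  intro c
  induction c with
  | zero =>
    intro j acc s hj
    rw [List.drop_eq_nil_of_le (by omega)]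
    simp [auxC]
  | succ c ih =>
    intro j acc s hj
    have hjlt : j < l.length := by omega
    have hdrop : l.drop j = l[j] :: l.drop (j + 1) := List.drop_eq_getElem_cons hjlt
    have hx : l[j]? = some l[j] := List.getElem?_eq_getElem hjlt
    rw [List.range'_succ, List.foldl_cons, hdrop]
    by_cases hb : (j + 1) % 256 = 0
    · have hstep : bodyN l l.length (acc, s) j = (acc ++ [s + l[j] * l[j]], 0) := by
        simp [bodyN, hb, hx]
      rw [hstep, ih (j + 1) _ _ (by omega)]
      have hr : 256 - j % 256 = 1 := by omega
      have hr' : 256 - (j + 1) % 256 = 256 := by omega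
      rw [hr, hr', auxC]
      simp
    · by_cases hl : j + 1 = l.length
      · have hc0 : c = 0 := by omega
        have hbL : ¬ l.length % 256 = 0 := by omega
        have hstep : bodyN l l.length (acc, s) j
            = (acc ++ [s + l[j] * l[j]], s + l[j] * l[j]) := by
          simp [bodyN, hl, hbL, hx, List.getD]
        have hnil : l.drop (j + 1) = [] := List.drop_eq_nil_of_le (by omega)
        rw [hstep, hc0, hnil, auxC]
        have hr1 : ¬ (256 - j % 256 = 1) := by omega
        simp [hr1]
      · have hstep : bodyN l l.length (acc, s) j = (acc, s + l[j] * l[j]) := by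
          simp [bodyN, hb, hl, hx]
        rw [hstep, ih (j + 1) _ _ (by omega)]
        have hne : l.drop (j + 1) ≠ [] := by
          apply List.ne_nil_of_length_pos; simp; omega
        have hr1 : ¬ (256 - j % 256 = 1) := by omega
        have hr' : 256 - (j + 1) % 256 = (256 - j % 256) - 1 := by omega
        rw [auxC]
        simp [hr1, hne, hr']

-- A computes auxC from a fresh block
lemma A_eq_auxC (l : List Int) : rmsEnergy l = auxC l 0 256 := by
  simp only [rmsEnergy]
  rw [PySem.List.pyRange_one]
  simp only [sub_zero, Int.toNat_natCast, List.foldl_map]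
  have hbody : (fun (st : List Int × Int) (k : Nat) =>
      (fun (st : List Int × Int) (i : Int) =>
        let x := PySem.List.pyGetD l i 0
        let s := st.2 + x * x
        if PySem.Int.mod (i + 1) 256 = 0 then (st.1 ++ [s], 0)
        else if i = (l.length : Int) - 1 then (st.1 ++ [s], s)
        else (st.1, s)) st ((0 : Int) + (k : Nat)))
      = bodyN l l.length := by
    funext st k
    have h1 : ((256 : Int) ∣ ((k : Int) + 1)) ↔ (k + 1) % 256 = 0 := by omega
    have h2 : ((k : Int) = (l.length : Int) - 1) ↔ (k + 1 = l.length) := by omega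
    simp [bodyN, h1, h2]
  rw [hbody, List.range_eq_range', loopA_eq l l.length 0 [] 0 (by omega)]
  simp

lemma A_eq_chunks (l : List Int) : rmsEnergy l = chunksSpec l := by
  rw [A_eq_auxC]
  cases hl : l with
  | nil => simp [auxC, chunksSpec_nil]
  | cons x xs =>
    rw [← hl, auxC_chunks l (by simp [hl]) 0 256 (by omega), hl, chunksSpec_cons]
    simp

-- B's chunk map, started at any offset, computes chunksSpec of the remaining suffix
lemma BGen (full : List Int) : ∀ (d j : Nat), full.length - j ≤ d →
    (PySem.List.pyRange (j : Int) (full.length : Int) 256).map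
      (fun st => sumsq (PySem.List.slice full (some st) (some (st + 256))))
      = chunksSpec (full.drop j) := by
  intro d
  induction d with
  | zero =>
    intro j hj
    rw [pr256_nil _ _ (by omega), List.drop_eq_nil_of_le (by omega)]
    simp [chunksSpec_nil]
  | succ d ih =>
    intro j hj
    by_cases h : j < full.length
    · rw [pr256_cons _ _ (by exact_mod_cast h), List.map_cons]
      have hsl : PySem.List.slice full (some (j : Int)) (some ((j : Int) + 256))
          = (full.drop j).take 256 := by
        have := PySem.List.slice_natCast_add (xs := full) (j := j) (n := 256)
        simpa using this
      have hcast : (j : Int) + 256 = ((j + 256 : Nat) : Int) := by push_cast; ring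
      rw [hsl, hcast, ih (j + 256) (by omega)]
      have hdd : full.drop (j + 256) = (full.drop j).drop 256 := by
        rw [List.drop_drop]
      cases hne : full.drop j with
      | nil => exact absurd hne (List.ne_nil_of_length_pos (by simp; omega))
      | cons y ys => rw [← hne, hdd, hne, chunksSpec_cons]
    · rw [pr256_nil _ _ (by omega), List.drop_eq_nil_of_le (by omega)]
      simp [chunksSpec]

lemma B_eq_chunks (l : List Int) : rmsEnergy_alt l = chunksSpec l := by
  unfold rmsEnergy_alt
  have := BGen l l.length 0 (by omega)
  simpa [sumsq] using this

-- ===== VERDICT (by name: the statement is the Claim_ definition above) =====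
theorem rmsEnergy_spec : Claim_equal_rmsEnergy := by
  intro l _
  unfold Spec_rmsEnergy
  rw [A_eq_chunks, B_eq_chunks]
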